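-- pv_equiv track=rewrite | github.com/s1sun/TCR-BCR-analysis-and-result-visualization | immune_profiler_V1_6.py | umi_polyGNs
-- ===== SOURCE A (Python) =====
-- def umi_polyGNs(umi):
--     """
--     Checks if a UMI (Unique Molecular Identifier) contains a poly-G or poly-N sequence.
--
--     Args:
--         umi (str): The UMI sequence.
--
--     Returns:
--         bool: True if the UMI contains poly-G or poly-N, False otherwise.
--     """
--     ispolyGs = False
--     i = 0
--     while i < len(umi) and not ispolyGs:
--         if umi[i:i+5] == 'GGGGG' or umi[i:i+5] == 'NNNNN':
--             ispolyGs = True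
--         i += 1
--     return ispolyGs
-- ===== SOURCE B (Python) =====
-- def umi_polyGNs(umi):
--     """
--     Checks if a UMI (Unique Molecular Identifier) contains a poly-G or poly-N sequence.
--
--     One left-to-right pass maintaining the lengths of the current consecutive
--     runs of 'G' and of 'N'; answers True as soon as a run reaches 5.
--     """
--     g = n = 0
--     for ch in umi:
--         g = g + 1 if ch == 'G' else 0
--         n = n + 1 if ch == 'N' else 0
--         if g >= 5 or n >= 5:
--             return True
--     return False
-- ===== Notes on version B (the rewrite author's own statement) =====
-- stated objective: faster
-- what changed: Replaces the window-slice scan (a fresh 5-character slice built and compared at every index) with a single pass that maintains two run-length counters for the current poly-G and poly-N runs and returns as soon as either reaches 5.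
import Mathlib
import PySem

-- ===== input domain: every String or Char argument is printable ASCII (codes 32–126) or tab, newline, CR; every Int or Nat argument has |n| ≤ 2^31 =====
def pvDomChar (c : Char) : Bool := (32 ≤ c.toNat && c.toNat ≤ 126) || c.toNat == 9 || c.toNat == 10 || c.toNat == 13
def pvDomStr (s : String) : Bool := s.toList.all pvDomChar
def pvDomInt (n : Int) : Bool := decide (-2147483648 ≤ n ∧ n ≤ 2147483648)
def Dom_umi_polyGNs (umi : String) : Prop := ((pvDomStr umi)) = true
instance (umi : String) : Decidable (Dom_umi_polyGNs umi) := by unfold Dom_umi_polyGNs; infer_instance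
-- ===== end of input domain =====

-- B replaces A's per-index 5-character window-slice comparison with a single pass
-- maintaining run-length counters for the current poly-G and poly-N runs (objective: faster, constant factor measured).

-- ===== PORT A =====
-- the two 5-character patterns A compares each slice against
def pvGs : List Char := ['G', 'G', 'G', 'G', 'G']
def pvNs : List Char := ['N', 'N', 'N', 'N', 'N']

-- A's while-loop: state (i, ispolyGs); umi[i:i+5] is PySem.List.slice on the code points
def pvALoop (cs : List Char) (i : Nat) (ispolyGs : Bool) : Bool :=
  if i < cs.length ∧ ispolyGs = false then
    pvALoop cs (i + 1)
      (if PySem.List.slice cs (some (i : Int)) (some ((i : Int) + 5)) = pvGs ∨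
          PySem.List.slice cs (some (i : Int)) (some ((i : Int) + 5)) = pvNs then
        true
      else ispolyGs)
  else ispolyGs
termination_by cs.length - i

def umi_polyGNs (umi : String) : Bool := pvALoop umi.toList 0 false

-- ===== PORT B =====
-- B's for-loop: run-length counters g, n; early return when either reaches 5
def pvBLoop : List Char → Nat → Nat → Bool
  | [], _, _ => false
  | c :: rest, g, n =>
    let g' := if c = 'G' then g + 1 else 0
    let n' := if c = 'N' then n + 1 else 0
    if 5 ≤ g' ∨ 5 ≤ n' then true else pvBLoop rest g' n'

def umi_polyGNs_alt (umi : String) : Bool := pvBLoop umi.toList 0 0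

-- ===== PRECONDITION & SPEC =====
def Spec_umi_polyGNs (umi : String) (out : Bool) : Prop := out = umi_polyGNs_alt umi
instance (umi : String) (out : Bool) : Decidable (Spec_umi_polyGNs umi out) := by unfold Spec_umi_polyGNs; infer_instance

-- ===== CLAIM (what is proved, stated in full; the proofs are below) =====
def Claim_equal_umi_polyGNs : Prop := ∀ (umi : String), Dom_umi_polyGNs umi → Spec_umi_polyGNs umi (umi_polyGNs umi)

-- ===== LEMMAS AND PROOFS =====

-- common characterisation: some 5-window of the list equals GGGGG or NNNNN
def pvWin5 : List Char → Bool
  | [] => false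
  | c :: rest =>
    if (c :: rest).take 5 = pvGs ∨ (c :: rest).take 5 = pvNs then true else pvWin5 rest

theorem pvALoop_true (cs : List Char) (i : Nat) : pvALoop cs i true = true := by
  unfold pvALoop; simp

theorem pvALoop_eq_win5 (cs : List Char) (i : Nat) :
    pvALoop cs i false = pvWin5 (cs.drop i) := by
  unfold pvALoop
  by_cases h : i < cs.length
  · simp only [h, and_self, if_pos]
    have hslice : PySem.List.slice cs (some (i : Int)) (some ((i : Int) + 5)) =
        (cs.drop i).take 5 := by
      have := PySem.List.slice_natCast_add cs i 5
      simpa using this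
    have hdrop : cs.drop i = cs[i] :: cs.drop (i + 1) := by
      rw [List.drop_eq_getElem_cons h]
    rw [hslice, hdrop]
    by_cases hw : (cs[i] :: cs.drop (i + 1)).take 5 = pvGs ∨
        (cs[i] :: cs.drop (i + 1)).take 5 = pvNs
    · rw [if_pos hw, pvALoop_true, pvWin5, if_pos hw]
    · rw [if_neg hw, pvALoop_eq_win5 cs (i + 1)]
      rw [pvWin5, if_neg hw]
  · have : cs.drop i = [] := List.drop_eq_nil_of_le (by omega)
    simp [h, this, pvWin5]
termination_by cs.length - i

-- windows starting inside a short all-'G' prefix never match when the next char is not 'G'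
theorem pvWin5_skipG (g : Nat) (hg : g ≤ 4) (c : Char) (rest : List Char) (hc : c ≠ 'G') :
    pvWin5 (List.replicate g 'G' ++ c :: rest) = pvWin5 (c :: rest) := by
  interval_cases g <;> simp [pvWin5, List.replicate, pvGs, pvNs, hc]

theorem pvWin5_skipN (n : Nat) (hn : n ≤ 4) (c : Char) (rest : List Char) (hc : c ≠ 'N') :
    pvWin5 (List.replicate n 'N' ++ c :: rest) = pvWin5 (c :: rest) := by
  interval_cases n <;> simp [pvWin5, List.replicate, pvGs, pvNs, hc]

theorem pvBLoop_consG (rest : List Char) (g n : Nat) :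
    pvBLoop ('G' :: rest) g n = if 5 ≤ g + 1 then true else pvBLoop rest (g + 1) 0 := by
  simp [pvBLoop]

theorem pvBLoop_consN (rest : List Char) (g n : Nat) :
    pvBLoop ('N' :: rest) g n = if 5 ≤ n + 1 then true else pvBLoop rest 0 (n + 1) := by
  simp [pvBLoop]

theorem pvBLoop_consOther (c : Char) (rest : List Char) (g n : Nat)
    (hG : ¬ c = 'G') (hN : ¬ c = 'N') :
    pvBLoop (c :: rest) g n = pvBLoop rest 0 0 := by
  simp [pvBLoop, hG, hN]

theorem pvBLoop_eq_win5 (l : List Char) : ∀ g n : Nat, g ≤ 4 → n ≤ 4 → (g = 0 ∨ n = 0) →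
    pvBLoop l g n = pvWin5 (List.replicate g 'G' ++ List.replicate n 'N' ++ l) := by
  induction l with
  | nil =>
    intro g n hg hn _
    interval_cases g <;> interval_cases n <;> decide
  | cons c rest ih =>
    intro g n hg hn hgn
    by_cases hG : c = 'G'
    · subst hG
      rw [pvBLoop_consG]
      rcases hgn with h0 | h0
      · -- g = 0, so the N-run (if any) is broken by this 'G'
        subst h0
        rw [if_neg (by omega : ¬ 5 ≤ 0 + 1)]
        simp only [List.replicate_zero, List.nil_append]
        rw [pvWin5_skipN n hn 'G' rest (by decide)]
        have := ih 1 0 (by omega) (by omega) (Or.inr rfl)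
        simpa using this
      · -- n = 0: the G-run extends
        subst h0
        simp only [List.replicate_zero, List.append_nil]
        have hrw : List.replicate g 'G' ++ 'G' :: rest =
            List.replicate (g + 1) 'G' ++ rest := by
          rw [List.replicate_succ']; simp
        rw [hrw]
        by_cases h5 : 5 ≤ g + 1
        · have hg4 : g = 4 := by omega
          subst hg4
          rw [if_pos h5]
          simp [pvWin5, pvGs]
        · rw [if_neg h5]
          have := ih (g + 1) 0 (by omega) (by omega) (Or.inr rfl)
          simpa using this
    · by_cases hN : c = 'N'
      · subst hN
        rw [pvBLoop_consN]
        rcases hgn with h0 | h0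
        · -- g = 0: the N-run extends
          subst h0
          simp only [List.replicate_zero, List.nil_append]
          have hrw : List.replicate n 'N' ++ 'N' :: rest =
              List.replicate (n + 1) 'N' ++ rest := by
            rw [List.replicate_succ']; simp
          rw [hrw]
          by_cases h5 : 5 ≤ n + 1
          · have hn4 : n = 4 := by omega
            subst hn4
            rw [if_pos h5]
            simp [pvWin5, pvNs]
          · rw [if_neg h5]
            have := ih 0 (n + 1) (by omega) (by omega) (Or.inl rfl)
            simpa using this
        · -- n = 0, so the G-run (if any) is broken by this 'N'
          subst h0
          rw [if_neg (by omega : ¬ 5 ≤ 0 + 1)]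
          simp only [List.replicate_zero, List.append_nil]
          rw [pvWin5_skipG g hg 'N' rest (by decide)]
          have := ih 0 1 (by omega) (by omega) (Or.inl rfl)
          simpa using this
      · -- c breaks both runs
        rw [pvBLoop_consOther c rest g n hG hN]
        have hhead : pvWin5 (c :: rest) = pvWin5 rest := by
          rw [pvWin5, if_neg ?_]
          simp [pvGs, pvNs, hG, hN]
        rcases hgn with h0 | h0
        · subst h0
          simp only [List.replicate_zero, List.nil_append]
          rw [pvWin5_skipN n hn c rest hN, hhead]
          have := ih 0 0 (by omega) (by omega) (Or.inl rfl)
          simpa using this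
        · subst h0
          simp only [List.replicate_zero, List.append_nil]
          rw [pvWin5_skipG g hg c rest hG, hhead]
          have := ih 0 0 (by omega) (by omega) (Or.inl rfl)
          simpa using this

-- ===== VERDICT (by name: the statement is the Claim_ definition above) =====
theorem umi_polyGNs_spec : Claim_equal_umi_polyGNs := by
  intro umi _
  show umi_polyGNs umi = umi_polyGNs_alt umi
  unfold umi_polyGNs umi_polyGNs_alt
  rw [pvALoop_eq_win5, pvBLoop_eq_win5 umi.toList 0 0 (by omega) (by omega) (Or.inl rfl)]
  simp
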